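-- pv_equiv track=rewrite | github.com/swanandi-bhende/mercator | backend/main.py | _tokenize_for_match
-- ===== SOURCE A (Python) =====
-- def _tokenize_for_match(value: str) -> set[str]:
--     """Tokenize free text into normalized search tokens.
--
--     Micropayment role: lexical matching fallback so fresh insights remain discoverable.
--     """
--     lowered = value.lower()
--     chunks: list[str] = []
--     current = []
--     for ch in lowered:
--         if ch.isalnum() or ch == "_":
--             current.append(ch)
--         elif current:
--             chunks.append("".join(current))
--             current = []
--     if current:
--         chunks.append("".join(current))
--     return {chunk for chunk in chunks if chunk}
-- ===== SOURCE B (Python) =====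
-- def _tokenize_for_match(value: str) -> set[str]:
--     """Tokenize free text into normalized search tokens (run-scanner version)."""
--     s = value.lower()
--     n = len(s)
--     tokens: set[str] = set()
--     i = 0
--     while i < n:
--         if s[i].isalnum() or s[i] == "_":
--             j = i + 1
--             while j < n and (s[j].isalnum() or s[j] == "_"):
--                 j += 1
--             tokens.add(s[i:j])
--             i = j
--         else:
--             i += 1
--     return tokens
-- ===== Notes on version B (the rewrite author's own statement) =====
-- stated objective: alternative
-- what changed: Replaces A's per-character buffer/flush state machine (accumulate chars, flush on delimiter, final flush, then filter empties) with a two-pointer run scanner that slices each maximal alphanumeric/underscore run directly out of the lowered string; no buffer, no flush cases, no empty-token filter.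
import Mathlib
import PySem

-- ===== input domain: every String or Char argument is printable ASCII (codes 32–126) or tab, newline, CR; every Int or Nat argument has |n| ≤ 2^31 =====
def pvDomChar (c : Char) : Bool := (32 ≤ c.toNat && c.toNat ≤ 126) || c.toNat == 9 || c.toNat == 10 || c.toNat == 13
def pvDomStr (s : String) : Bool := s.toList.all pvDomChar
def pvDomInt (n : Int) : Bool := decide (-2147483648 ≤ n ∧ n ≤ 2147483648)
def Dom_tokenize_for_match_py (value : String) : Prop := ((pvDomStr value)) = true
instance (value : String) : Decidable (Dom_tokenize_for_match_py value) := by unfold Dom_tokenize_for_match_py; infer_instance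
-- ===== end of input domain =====

-- B replaces A's buffer/flush state machine with a two-pointer run scanner over the lowered
-- string (alternative decomposition, same cost).

-- token-character predicate: ch.isalnum() or ch == "_"   (shared by both ports)
def pvOk (c : Char) : Bool := PySem.Chars.isalnum c || c == '_'

-- ===== PORT A =====
-- loop body of A: state = (chunks, current)
def tokAstep (st : List String × List Char) (ch : Char) : List String × List Char :=
  if pvOk ch then (st.1, st.2 ++ [ch])
  else if st.2 = [] then st
  else (st.1 ++ [String.ofList st.2], [])

def tokenize_for_match_py (value : String) : List String :=
  let lowered := PySem.Str.lower value
  let r := lowered.toList.foldl tokAstep ([], [])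
  let chunks := if r.2 = [] then r.1 else r.1 ++ [String.ofList r.2]
  PySem.Set.ofList (chunks.filter (fun c => c != ""))

-- ===== PORT B =====
-- B's run scanner: skip a non-token char, or slice off the maximal run of token chars
def tokBscan (l : List Char) : List String :=
  match l with
  | [] => []
  | c :: cs =>
    if pvOk c then
      String.ofList ((c :: cs).takeWhile pvOk) :: tokBscan ((c :: cs).dropWhile pvOk)
    else tokBscan cs
termination_by l.length
decreasing_by
  · simp only [List.dropWhile_cons, *, if_pos]
    exact Nat.lt_succ_of_le (List.length_dropWhile_le pvOk cs)
  · simp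

def tokenize_for_match_py_alt (value : String) : List String :=
  PySem.Set.ofList (tokBscan (PySem.Str.lower value).toList)

-- ===== PRECONDITION & SPEC =====
def Spec_tokenize_for_match_py (value : String) (out : List String) : Prop := out = tokenize_for_match_py_alt value
instance (value : String) (out : List String) : Decidable (Spec_tokenize_for_match_py value out) := by unfold Spec_tokenize_for_match_py; infer_instance

-- ===== CLAIM (what is proved, stated in full; the proofs are below) =====
def Claim_equal_tokenize_for_match_py : Prop := ∀ (value : String), Dom_tokenize_for_match_py value → Spec_tokenize_for_match_py value (tokenize_for_match_py value)

-- ===== LEMMAS AND PROOFS =====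

-- the tokens A's loop will still emit, given pending buffer `cur` and remaining input
def joinRuns (cur : List Char) (l : List Char) : List String :=
  match l with
  | [] => if cur = [] then [] else [String.ofList cur]
  | c :: cs =>
    if pvOk c then joinRuns (cur ++ [c]) cs
    else (if cur = [] then [] else [String.ofList cur]) ++ joinRuns [] cs

def finalizeTok (st : List String × List Char) : List String :=
  if st.2 = [] then st.1 else st.1 ++ [String.ofList st.2]

lemma foldl_tokAstep (l : List Char) : ∀ chunks cur,
    finalizeTok (l.foldl tokAstep (chunks, cur)) = chunks ++ joinRuns cur l := by
  induction l with
  | nil =>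
    intro chunks cur
    by_cases h : cur = [] <;> simp [finalizeTok, joinRuns, h]
  | cons c cs ih =>
    intro chunks cur
    by_cases hc : pvOk c
    · simp [List.foldl_cons, tokAstep, hc, joinRuns, ih]
    · by_cases hcur : cur = []
      · simp [List.foldl_cons, tokAstep, hc, hcur, joinRuns, ih]
      · simp [List.foldl_cons, tokAstep, hc, hcur, joinRuns, ih]

lemma joinRuns_eq (l : List Char) : ∀ cur,
    joinRuns cur l =
      if cur = [] then tokBscan l
      else String.ofList (cur ++ l.takeWhile pvOk) :: tokBscan (l.dropWhile pvOk) := by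
  induction l with
  | nil =>
    intro cur
    by_cases h : cur = [] <;> simp [joinRuns, tokBscan, h]
  | cons c cs ih =>
    intro cur
    by_cases hc : pvOk c
    · by_cases hcur : cur = []
      · subst hcur
        simp only [joinRuns, hc, if_pos, List.nil_append, ih]
        simp [tokBscan, hc, List.takeWhile_cons, List.dropWhile_cons]
      · simp only [joinRuns, hc, if_pos, ih, List.append_eq_nil_iff]
        simp [hcur, hc, List.takeWhile_cons, List.dropWhile_cons]
    · by_cases hcur : cur = []
      · simp [joinRuns, hc, hcur, ih, tokBscan]
      · simp [joinRuns, hc, hcur, ih, tokBscan, List.takeWhile_cons, List.dropWhile_cons]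

lemma tokBscan_ne_empty (l : List Char) : ∀ s ∈ tokBscan l, s ≠ "" := by
  fun_induction tokBscan with
  | case1 => simp
  | case2 c cs hc ih =>
    intro s hs
    rcases List.mem_cons.mp hs with h | h
    · subst h
      intro h
      have h2 := congrArg String.toList h
      rw [List.takeWhile_cons, if_pos hc] at h2
      simp at h2
    · exact ih s h
  | case3 c cs hc ih =>
    intro s hs
    exact ih s hs

lemma filter_tokBscan (l : List Char) :
    (tokBscan l).filter (fun c => c != "") = tokBscan l := by
  apply List.filter_eq_self.mpr
  intro a ha
  simpa using tokBscan_ne_empty l a ha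

-- ===== VERDICT (by name: the statement is the Claim_ definition above) =====
theorem tokenize_for_match_py_spec : Claim_equal_tokenize_for_match_py := by
  intro value _
  unfold Spec_tokenize_for_match_py tokenize_for_match_py tokenize_for_match_py_alt
  have h := foldl_tokAstep (PySem.Str.lower value).toList [] []
  simp only [List.nil_append] at h
  have h2 := joinRuns_eq (PySem.Str.lower value).toList []
  simp only [if_true] at h2
  simp only [finalizeTok] at h
  dsimp only
  rw [h, h2, filter_tokBscan]
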